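-- pv_equiv track=rewrite | github.com/baeckertv/Clifford-Pickover-Geheimdienst | isbn_tiefanalyse.py | finde_palindrome
-- ===== SOURCE A (Python) =====
-- def finde_palindrome(text, min_len=4):
--     """Findet Palindrome in der Ziffernfolge"""
--     ziffern = [c for c in text if c.isdigit()]
--     palindrome = []
--
--     for i in range(len(ziffern)):
--         for j in range(i + min_len, min(i + 15, len(ziffern) + 1)):
--             teil = ziffern[i:j]
--             if teil == teil[::-1] and len(teil) >= min_len:
--                 palindrome.append((i, ''.join(teil)))
--
--     return palindrome
-- ===== SOURCE B (Python) =====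
-- def finde_palindrome(text, min_len=4):
--     """Findet Palindrome in der Ziffernfolge (Mittelpunkt-Expansion)"""
--     ziffern = [c for c in text if c.isdigit()]
--     n = len(ziffern)
--     gefunden = []
--     for mitte in range(n):
--         for links, rechts in ((mitte, mitte), (mitte, mitte + 1)):
--             while links >= 0 and rechts < n and ziffern[links] == ziffern[rechts]:
--                 laenge = rechts - links + 1
--                 if laenge > 14:
--                     break
--                 if laenge >= min_len:
--                     gefunden.append((links, ''.join(ziffern[links:rechts + 1])))
--                 links -= 1
--                 rechts += 1
--     gefunden.sort(key=lambda t: (t[0], len(t[1])))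
--     return gefunden
-- ===== Notes on version B (the rewrite author's own statement) =====
-- stated objective: alternative
-- what changed: Replaces A's brute-force scan over all (start,end) windows with per-substring palindrome tests by centre expansion (expand around each odd/even centre while ends match, stopping past the length-14 cap) followed by a stable sort on (start, length) to restore A's ordering.
-- intended difference: For min_len <= 0 on texts containing a digit, A returns extra accidental entries - an empty-string tuple (i, '') for every start and, for negative min_len, substrings produced by Python's negative-slice wraparound - while B returns exactly the palindromic digit substrings of length between 1 and 14, which is the intended meaning of a non-positive minimum length. — e.g. on finde_palindrome("1", 0): A returns [(0, ""), (0, "1")], B returns [(0, "1")]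
import Mathlib
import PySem

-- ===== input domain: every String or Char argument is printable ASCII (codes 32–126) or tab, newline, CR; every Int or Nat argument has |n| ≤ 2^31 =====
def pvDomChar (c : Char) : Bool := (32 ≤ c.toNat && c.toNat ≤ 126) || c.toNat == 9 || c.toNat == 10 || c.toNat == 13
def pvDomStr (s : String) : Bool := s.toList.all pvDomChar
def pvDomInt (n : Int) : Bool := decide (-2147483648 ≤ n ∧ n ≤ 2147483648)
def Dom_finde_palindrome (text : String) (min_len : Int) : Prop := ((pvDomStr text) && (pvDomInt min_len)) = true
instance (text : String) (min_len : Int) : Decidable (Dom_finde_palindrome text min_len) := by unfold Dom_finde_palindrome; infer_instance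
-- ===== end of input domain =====

-- B replaces A's scan over all (start,end) windows by centre expansion plus a final
-- sort on (start, length); on min_len ≤ 0 with digits present B intentionally drops
-- A's accidental empty-string / wraparound-slice entries (see D_ below).

-- ===== PORT A =====
-- 'teil == teil[::-1]' is ported as 'teil == teil.reverse' (PySem.List.slice?_none_none_neg_one);
-- ''.join(teil) on a list of single characters is String.ofList.
def finde_palindrome (text : String) (min_len : Int) : List (Int × String) :=
  let ziffern : List Char := text.toList.filter PySem.Chars.isdigit
  (PySem.List.pyRange 0 (ziffern.length : Int) 1).foldl
    (fun palindrome i =>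
      (PySem.List.pyRange (i + min_len) (min (i + 15) ((ziffern.length : Int) + 1)) 1).foldl
        (fun palindrome j =>
          let teil := PySem.List.slice ziffern (some i) (some j)
          if teil == teil.reverse && decide (min_len ≤ (teil.length : Int)) then
            palindrome ++ [(i, String.ofList teil)]
          else palindrome)
        palindrome)
    []

-- ===== PORT B =====
-- the 'while links >= 0 and rechts < n and ziffern[links] == ziffern[rechts]' loop of Source B
-- the loop runs at most l+1 more times once the left index is l; the explicit fuel
-- (l+1).toNat only makes that termination measure structural, it never cuts the loop short
def pvExpandGo (z : List Char) (min_len : Int) : Nat → Int → Int → List (Int × String) → List (Int × String)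
  | 0, _, _, acc => acc
  | fuel + 1, l, r, acc =>
    if 0 ≤ l ∧ r < (z.length : Int) ∧ PySem.List.pyGet? z l = PySem.List.pyGet? z r then
      if r - l + 1 > 14 then acc
      else
        pvExpandGo z min_len fuel (l - 1) (r + 1)
          (if min_len ≤ r - l + 1 then
            acc ++ [(l, String.ofList (PySem.List.slice z (some l) (some (r + 1))))]
          else acc)
    else acc

def pvExpand (z : List Char) (min_len : Int) (l r : Int) (acc : List (Int × String)) :
    List (Int × String) :=
  pvExpandGo z min_len (l + 1).toNat l r acc

def finde_palindrome_alt (text : String) (min_len : Int) : List (Int × String) :=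
  let ziffern : List Char := text.toList.filter PySem.Chars.isdigit
  let gefunden := (PySem.List.pyRange 0 (ziffern.length : Int) 1).foldl
    (fun acc mitte => pvExpand ziffern min_len mitte (mitte + 1) (pvExpand ziffern min_len mitte mitte acc)) []
  PySem.List.sorted2 gefunden (fun t => t.1) (fun t => PySem.Str.len t.2) false

-- ===== PRECONDITION & SPEC =====
-- For min_len ≤ 0 on texts containing a digit, A returns extra accidental entries — an
-- empty-string tuple (i, '') for every start and, for negative min_len, substrings produced
-- by Python's negative-slice wraparound — while B returns exactly the palindromic digit
-- substrings of length 1..14, the intended meaning of a non-positive minimum length.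
def D_finde_palindrome (text : String) (min_len : Int) : Prop :=
  min_len ≤ 0 ∧ (text.toList.any PySem.Chars.isdigit) = true
instance (text : String) (min_len : Int) : Decidable (D_finde_palindrome text min_len) := by
  unfold D_finde_palindrome; infer_instance

def Spec_finde_palindrome (text : String) (min_len : Int) (out : List (Int × String)) : Prop :=
  ¬ D_finde_palindrome text min_len → out = finde_palindrome_alt text min_len
instance (text : String) (min_len : Int) (out : List (Int × String)) : Decidable (Spec_finde_palindrome text min_len out) := by unfold Spec_finde_palindrome; infer_instance

def pvDiffWitness_finde_palindrome : String × Int := ("1", 0)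
def pvDiffWitnessOut_finde_palindrome : (List (Int × String)) × (List (Int × String)) :=
  ([(0, ""), (0, "1")], [(0, "1")])

-- ===== CLAIM (what is proved, stated in full; the proofs are below) =====
def Claim_unchanged_finde_palindrome : Prop := ∀ (text : String) (min_len : Int), Dom_finde_palindrome text min_len → Spec_finde_palindrome text min_len (finde_palindrome text min_len)
def Claim_changed_finde_palindrome : Prop := Dom_finde_palindrome (pvDiffWitness_finde_palindrome.1) (pvDiffWitness_finde_palindrome.2) ∧ D_finde_palindrome (pvDiffWitness_finde_palindrome.1) (pvDiffWitness_finde_palindrome.2) ∧ finde_palindrome (pvDiffWitness_finde_palindrome.1) (pvDiffWitness_finde_palindrome.2) = pvDiffWitnessOut_finde_palindrome.1 ∧ finde_palindrome_alt (pvDiffWitness_finde_palindrome.1) (pvDiffWitness_finde_palindrome.2) = pvDiffWitnessOut_finde_palindrome.2 ∧ pvDiffWitnessOut_finde_palindrome.1 ≠ pvDiffWitnessOut_finde_palindrome.2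
def Claim_exact_finde_palindrome : Prop := ∀ (text : String) (min_len : Int), Dom_finde_palindrome text min_len → D_finde_palindrome text min_len → finde_palindrome text min_len ≠ finde_palindrome_alt text min_len

-- ===== LEMMAS AND PROOFS =====

-- segment z[i : i+L] as a list, and palindromicity
def pvSeg (z : List Char) (i L : Nat) : List Char := (z.drop i).take L
def pvPal (t : List Char) : Prop := t.reverse = t

-- the palindromic digit substrings both programs are about, and their common entry shape
def pvGood (z : List Char) (m : Int) (i L : Nat) : Prop :=
  1 ≤ L ∧ m ≤ (L : Int) ∧ L ≤ 14 ∧ i + L ≤ z.length ∧ pvPal (pvSeg z i L)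
def pvEntry (z : List Char) (i L : Nat) : Int × String := ((i : Int), String.ofList (pvSeg z i L))

lemma pvSeg_length (z : List Char) (i L : Nat) (h : i + L ≤ z.length) :
    (pvSeg z i L).length = L := by
  simp [pvSeg]; omega

lemma pvGetElem_congr (z : List Char) (a b : Nat) (h : a = b) (hb : b < z.length) :
    z[a]'(h ▸ hb) = z[b]'hb := by subst h; rfl

lemma pvSeg_congr (z : List Char) (a a' b b' : Nat) (h1 : a = a') (h2 : b = b') :
    pvSeg z a b = pvSeg z a' b' := by rw [h1, h2]

lemma pvPal_small (t : List Char) (h : t.length ≤ 1) : pvPal t := by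
  match t with
  | [] => rfl
  | [c] => rfl
  | c :: d :: t => simp at h

lemma pvSeg_cons (z : List Char) (a K : Nat) (ha : a < z.length) :
    pvSeg z a (K+1) = z[a] :: pvSeg z (a+1) K := by
  rw [pvSeg, List.drop_eq_getElem_cons ha, List.take_succ_cons]; rfl

lemma pvSeg_snoc (z : List Char) (a K : Nat) (h : a + K < z.length) :
    pvSeg z a (K+1) = pvSeg z a K ++ [z[a+K]] := by
  rw [pvSeg, List.take_add_one]
  have : (z.drop a)[K]? = some z[a + K] := by
    rw [List.getElem?_drop, List.getElem?_eq_getElem (by omega)]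
  rw [this]; rfl

lemma pvSeg_decomp (z : List Char) (i K : Nat) (_hb : i + K + 2 ≤ z.length)
    (hi : i < z.length) (hj : i + 1 + K < z.length) :
    pvSeg z i (K+2) = z[i] :: (pvSeg z (i+1) K ++ [z[i + 1 + K]]) := by
  rw [pvSeg_cons z i (K+1) hi, pvSeg_snoc z (i+1) K (by omega)]

lemma pvPal_iff (c d : Char) (s : List Char) :
    pvPal (c :: (s ++ [d])) ↔ c = d ∧ pvPal s := by
  unfold pvPal
  simp only [List.reverse_cons, List.reverse_append, List.reverse_nil, List.nil_append,
    List.cons_append, List.cons.injEq, List.append_singleton_inj]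
  constructor
  · rintro ⟨rfl, h, -⟩
    exact ⟨rfl, h⟩
  · rintro ⟨rfl, h⟩
    exact ⟨rfl, h, rfl⟩

lemma pvSeg_pal_shrink (z : List Char) (i L : Nat) (h2 : 2 ≤ L) (hb : i + L ≤ z.length)
    (hp : pvPal (pvSeg z i L)) : pvPal (pvSeg z (i+1) (L-2)) := by
  obtain ⟨K, rfl⟩ : ∃ K, L = K + 2 := ⟨L - 2, by omega⟩
  rw [pvSeg_decomp z i K (by omega) (by omega) (by omega)] at hp
  simpa using ((pvPal_iff _ _ _).1 hp).2

lemma pvSeg_pal_ends (z : List Char) (i L : Nat) (h1 : 1 ≤ L) (hb : i + L ≤ z.length)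
    (hp : pvPal (pvSeg z i L)) (hi : i < z.length) (hj : i + L - 1 < z.length) :
    z[i] = z[i + L - 1] := by
  rcases eq_or_lt_of_le h1 with h | h
  · congr 1; omega
  · obtain ⟨K, rfl⟩ : ∃ K, L = K + 2 := ⟨L - 2, by omega⟩
    rw [pvSeg_decomp z i K (by omega) (by omega) (by omega)] at hp
    have := ((pvPal_iff _ _ _).1 hp).1
    rw [this]; congr 1; omega

lemma pvSeg_pal_grow (z : List Char) (i L : Nat) (h2 : 2 ≤ L) (hb : i + L ≤ z.length)
    (hi : i < z.length) (hj : i + L - 1 < z.length)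
    (he : z[i] = z[i + L - 1]) (hp : pvPal (pvSeg z (i+1) (L-2))) : pvPal (pvSeg z i L) := by
  obtain ⟨K, rfl⟩ : ∃ K, L = K + 2 := ⟨L - 2, by omega⟩
  rw [pvSeg_decomp z i K (by omega) (by omega) (by omega)]
  refine (pvPal_iff _ _ _).2 ⟨?_, by simpa using hp⟩
  rw [he]; congr 1; omega

lemma pvSeg_pal_chain (z : List Char) (i L : Nat) (hb : i + L ≤ z.length)
    (hp : pvPal (pvSeg z i L)) : ∀ d, 2*d ≤ L → pvPal (pvSeg z (i+d) (L-2*d)) := by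
  intro d
  induction d generalizing i L with
  | zero => intro _; simpa using hp
  | succ d ih =>
    intro hd
    have h1 := pvSeg_pal_shrink z i L (by omega) hb hp
    have := ih (i+1) (L-2) (by omega) h1 (by omega)
    have e1 : i + 1 + d = i + (d+1) := by omega
    have e2 : L - 2 - 2*d = L - 2*(d+1) := by omega
    rwa [e1, e2] at this

-- ===== A-side characterisation =====
def pvPredA (z : List Char) (m i : Int) (j : Int) : Bool :=
  (PySem.List.slice z (some i) (some j)) == (PySem.List.slice z (some i) (some j)).reverse
    && decide (m ≤ ((PySem.List.slice z (some i) (some j)).length : Int))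

def pvAList (z : List Char) (m : Int) : List (Int × String) :=
  (PySem.List.pyRange 0 (z.length : Int) 1).flatMap (fun i =>
    ((PySem.List.pyRange (i + m) (min (i + 15) ((z.length : Int) + 1)) 1).filter (pvPredA z m i)).map
      (fun j => (i, String.ofList (PySem.List.slice z (some i) (some j)))))

lemma A_eq (text : String) (m : Int) :
    finde_palindrome text m = pvAList (text.toList.filter PySem.Chars.isdigit) m := by
  unfold finde_palindrome pvAList
  set z := text.toList.filter PySem.Chars.isdigit with hz
  refine Eq.trans (PySem.List.foldl_congr_mem _ _
    (fun (acc : List (Int × String)) i => acc ++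
      ((PySem.List.pyRange (i + m) (min (i + 15) ((z.length : Int) + 1)) 1).filter (pvPredA z m i)).map
        (fun j => (i, String.ofList (PySem.List.slice z (some i) (some j))))) []
    (fun acc i _ => PySem.List.foldl_append_if (pvPredA z m i) _ _ _)) ?_
  rw [PySem.List.foldl_append_eq_flatMap]
  simp

lemma pvSlice_seg (z : List Char) (i j : Int) (h0 : 0 ≤ i) (hij : i ≤ j) :
    PySem.List.slice z (some i) (some j) = pvSeg z i.toNat (j - i).toNat := by
  rw [PySem.List.slice_toNat z h0 (by omega)]
  exact pvSeg_congr z _ _ _ _ rfl (by omega)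

lemma A_mem (z : List Char) (m : Int) (hm : 1 ≤ m) (p : Int × String) :
    p ∈ pvAList z m ↔ ∃ i L : Nat, pvGood z m i L ∧ p = pvEntry z i L := by
  unfold pvAList
  rw [List.mem_flatMap]
  constructor
  · rintro ⟨i, hi, hp⟩
    rw [PySem.List.mem_pyRange_one] at hi
    rw [List.mem_map] at hp
    obtain ⟨j, hj, rfl⟩ := hp
    rw [List.mem_filter] at hj
    obtain ⟨hjr, hpred⟩ := hj
    rw [PySem.List.mem_pyRange_one] at hjr
    obtain ⟨hj1, hj2⟩ := hjr
    rw [lt_min_iff] at hj2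
    have hij : i ≤ j := by omega
    unfold pvPredA at hpred
    rw [pvSlice_seg z i j hi.1 hij] at hpred ⊢
    simp only [Bool.and_eq_true, beq_iff_eq, decide_eq_true_eq] at hpred
    refine ⟨i.toNat, (j - i).toNat, ⟨by omega, ?_, by omega, ?_, ?_⟩,
      by simp only [pvEntry, Prod.mk.injEq]; exact ⟨by omega, by simp⟩⟩
    · have := hpred.2
      have hlen : (pvSeg z i.toNat (j - i).toNat).length ≤ (j - i).toNat := by
        simp [pvSeg]
      omega
    · have hjn : j ≤ (z.length : Int) := by omega
      omega
    · exact hpred.1.symm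
  · rintro ⟨i, L, ⟨hL1, hLm, hL14, hbnd, hpal⟩, rfl⟩
    have hin : (i : Int) < (z.length : Int) := by push_cast; omega
    refine ⟨(i : Int), ?_, ?_⟩
    · rw [PySem.List.mem_pyRange_one]
      exact ⟨by positivity, hin⟩
    · rw [List.mem_map]
      refine ⟨(i : Int) + (L : Int), ?_, ?_⟩
      · rw [List.mem_filter]
        constructor
        · rw [PySem.List.mem_pyRange_one, lt_min_iff]
          refine ⟨by omega, by push_cast; omega, by push_cast; omega⟩
        · unfold pvPredA
          rw [pvSlice_seg z (i : Int) ((i : Int) + (L : Int)) (by positivity) (by omega)]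
          rw [pvSeg_congr z ((i:Int)).toNat i (((i:Int) + (L:Int)) - (i:Int)).toNat L (by omega) (by omega)]
          simp only [Bool.and_eq_true, beq_iff_eq, decide_eq_true_eq]
          exact ⟨hpal.symm, by rw [pvSeg_length z i L hbnd]; omega⟩
      · rw [pvSlice_seg z (i : Int) ((i : Int) + (L : Int)) (by positivity) (by omega)]
        rw [pvSeg_congr z ((i:Int)).toNat i (((i:Int) + (L:Int)) - (i:Int)).toNat L (by omega) (by omega)]
        rfl

def pvKey (p : Int × String) : Lex (Int × Int) := toLex (p.1, PySem.Str.len p.2)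

lemma A_pairwise (z : List Char) (m : Int) (hm : 1 ≤ m) :
    (pvAList z m).Pairwise (fun p q => pvKey p < pvKey q) := by
  unfold pvAList
  rw [List.pairwise_flatMap]
  constructor
  · intro i hi
    rw [PySem.List.mem_pyRange_one] at hi
    rw [List.pairwise_map]
    refine List.Pairwise.imp_of_mem ?_
      ((PySem.List.pairwise_lt_pyRange_one (i + m) (min (i + 15) ((z.length : Int) + 1))).filter
        (pvPredA z m i))
    intro j j' hj hj' hlt
    rw [List.mem_filter, PySem.List.mem_pyRange_one] at hj hj'
    have hij : i ≤ j := by have := hj.1.1; omega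
    have hij' : i ≤ j' := by have := hj'.1.1; omega
    have hjn : j ≤ (z.length : Int) := by have := hj.1.2; rw [lt_min_iff] at this; omega
    have hjn' : j' ≤ (z.length : Int) := by have := hj'.1.2; rw [lt_min_iff] at this; omega
    simp only [pvKey, Prod.Lex.toLex_lt_toLex]
    right
    refine ⟨by simp, ?_⟩
    rw [pvSlice_seg z i j hi.1 hij, pvSlice_seg z i j' hi.1 hij']
    simp only [PySem.Str.len_eq, String.toList_ofList]
    rw [pvSeg_length z _ _ (by omega), pvSeg_length z _ _ (by omega)]
    omega
  · refine List.Pairwise.imp ?_ (PySem.List.pairwise_lt_pyRange_one 0 (z.length : Int))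
    intro i i' hlt x hx y hy
    rw [List.mem_map] at hx hy
    obtain ⟨j, -, rfl⟩ := hx
    obtain ⟨j', -, rfl⟩ := hy
    simp only [pvKey, Prod.Lex.toLex_lt_toLex]
    exact Or.inl hlt

-- ===== B-side characterisation =====
def pvE (z : List Char) (m : Int) (l r : Int) : List (Int × String) := pvExpand z m l r []

lemma pvExpandGo_acc (z : List Char) (m : Int) (fuel : Nat) :
    ∀ (l r : Int) (acc : List (Int × String)),
      pvExpandGo z m fuel l r acc = acc ++ pvExpandGo z m fuel l r [] := by
  induction fuel with
  | zero => intro l r acc; simp [pvExpandGo]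
  | succ fuel ih =>
    intro l r acc
    rw [pvExpandGo, pvExpandGo]
    split_ifs with h1 h2 h3
    · simp
    · rw [ih (l-1) (r+1) (acc ++ [(l, String.ofList (PySem.List.slice z (some l) (some (r + 1))))]),
        ih (l-1) (r+1) ([] ++ [(l, String.ofList (PySem.List.slice z (some l) (some (r + 1))))])]
      simp
    · exact ih _ _ _
    · simp

lemma pvExpand_acc (z : List Char) (m : Int) (l r : Int) (acc : List (Int × String)) :
    pvExpand z m l r acc = acc ++ pvE z m l r := by
  unfold pvExpand pvE
  exact pvExpandGo_acc z m _ l r acc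

lemma pvE_eq (z : List Char) (m : Int) (l r : Int) :
    pvE z m l r =
      if 0 ≤ l ∧ r < (z.length : Int) ∧ PySem.List.pyGet? z l = PySem.List.pyGet? z r then
        if r - l + 1 > 14 then []
        else (if m ≤ r - l + 1 then
                [(l, String.ofList (PySem.List.slice z (some l) (some (r + 1))))]
              else []) ++ pvE z m (l - 1) (r + 1)
      else [] := by
  unfold pvE pvExpand
  by_cases h1 : 0 ≤ l ∧ r < (z.length : Int) ∧ PySem.List.pyGet? z l = PySem.List.pyGet? z r
  · have hf : (l + 1).toNat = ((l + 1).toNat - 1) + 1 := by omega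
    rw [hf, pvExpandGo, if_pos h1]
    by_cases h2 : r - l + 1 > 14
    · rw [if_pos h2, if_pos h1, if_pos h2]
    · rw [if_neg h2, if_neg h2, if_pos h1, pvExpandGo_acc]
      have : (l - 1 + 1).toNat = (l + 1).toNat - 1 := by omega
      rw [this]
      split_ifs <;> simp
  · rw [if_neg h1]
    cases hf : (l + 1).toNat with
    | zero => rw [pvExpandGo]
    | succ k => rw [pvExpandGo, if_neg h1]

def pvEStmt (z : List Char) (m : Int) (l r : Int) (p : Int × String) : Prop :=
  ∃ k : Nat, (k : Int) ≤ l ∧ r + k < (z.length : Int) ∧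
    m ≤ r - l + 1 + 2*k ∧ r - l + 1 + 2*k ≤ 14 ∧
    pvPal (pvSeg z (l - k).toNat (r - l + 1 + 2*k).toNat) ∧
    p = ((l - k : Int), String.ofList (pvSeg z (l - k).toNat (r - l + 1 + 2*k).toNat))

lemma pvGet?_eq (z : List Char) (l : Int) (h0 : 0 ≤ l) (h1 : l < (z.length : Int)) :
    PySem.List.pyGet? z l = some (z[l.toNat]'(by omega)) := by
  obtain ⟨n, rfl⟩ : ∃ n : Nat, l = (n : Int) := ⟨l.toNat, by omega⟩
  rw [PySem.List.pyGet?_natCast, List.getElem?_eq_getElem (by omega)]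
  exact congrArg some (pvGetElem_congr z n _ (by omega) (by omega)).symm

lemma pal_ends_get (z : List Char) (l r : Int) (h0 : 0 ≤ l) (hlr : l ≤ r)
    (hr : r < (z.length : Int)) (hp : pvPal (pvSeg z l.toNat (r - l + 1).toNat)) :
    PySem.List.pyGet? z l = PySem.List.pyGet? z r := by
  rw [pvGet?_eq z l h0 (by omega), pvGet?_eq z r (by omega) hr]
  have hE := pvSeg_pal_ends z l.toNat ((r - l + 1).toNat) (by omega) (by omega) hp
    (by omega) (by omega)
  rw [hE]
  exact congrArg some (pvGetElem_congr z _ _ (by omega) (by omega))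

lemma pal_step (z : List Char) (l r : Int) (h0 : 0 ≤ l) (hlr : l ≤ r)
    (hr : r < (z.length : Int))
    (hin : pvPal (pvSeg z (l+1).toNat (r - l - 1).toNat))
    (he : PySem.List.pyGet? z l = PySem.List.pyGet? z r) :
    pvPal (pvSeg z l.toNat (r - l + 1).toNat) := by
  rcases eq_or_lt_of_le hlr with h | h
  · subst h
    apply pvPal_small
    have : (pvSeg z l.toNat ((l - l + 1).toNat)).length ≤ (l - l + 1).toNat := by
      simp [pvSeg]
    omega
  · have hval : z[l.toNat]'(by omega) = z[r.toNat]'(by omega) := by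
      rw [pvGet?_eq z l h0 (by omega), pvGet?_eq z r (by omega) hr] at he
      exact Option.some.inj he
    apply pvSeg_pal_grow z l.toNat ((r - l + 1).toNat) (by omega) (by omega) (by omega) (by omega)
    · rw [hval]
      exact (pvGetElem_congr z _ _ (by omega) (by omega)).symm
    · rw [pvSeg_congr z (l.toNat + 1) (l+1).toNat ((r - l + 1).toNat - 2) (r - l - 1).toNat
        (by omega) (by omega)]
      exact hin

lemma chain_to_cur (z : List Char) (l r : Int) (k : Nat) (h0 : 0 ≤ l) (hk : (k : Int) ≤ l)
    (hlr : l ≤ r) (hrk : r + k < (z.length : Int))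
    (hp : pvPal (pvSeg z (l - k).toNat (r - l + 1 + 2*k).toNat)) :
    pvPal (pvSeg z l.toNat (r - l + 1).toNat) := by
  have := pvSeg_pal_chain z (l - k).toNat ((r - l + 1 + 2*k).toNat) (by omega) hp k (by omega)
  rwa [pvSeg_congr z ((l - k).toNat + k) l.toNat ((r - l + 1 + 2*k).toNat - 2*k) (r - l + 1).toNat
    (by omega) (by omega)] at this

lemma E_mem_step (z : List Char) (m : Int) (l r : Int) (h0 : 0 ≤ l) (hlr : l ≤ r)
    (hin : pvPal (pvSeg z (l+1).toNat (r - l - 1).toNat))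
    (htail : pvPal (pvSeg z l.toNat (r - l + 1).toNat) →
      ∀ p, p ∈ pvE z m (l-1) (r+1) ↔ pvEStmt z m (l-1) (r+1) p) :
    ∀ p, p ∈ pvE z m l r ↔ pvEStmt z m l r p := by
  intro p
  rw [pvE_eq]
  by_cases hc : 0 ≤ l ∧ r < (z.length : Int) ∧ PySem.List.pyGet? z l = PySem.List.pyGet? z r
  · obtain ⟨h0', hrn, hget⟩ := hc
    rw [if_pos ⟨h0', hrn, hget⟩]
    have palcur : pvPal (pvSeg z l.toNat (r - l + 1).toNat) :=
      pal_step z l r h0 hlr hrn hin hget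
    by_cases h14 : r - l + 1 > 14
    · rw [if_pos h14]
      simp only [List.not_mem_nil, false_iff]
      rintro ⟨k, hk1, hk2, hk3, hk4, hk5, hk6⟩
      omega
    · rw [if_neg h14]
      have hslice : PySem.List.slice z (some l) (some (r + 1)) = pvSeg z l.toNat (r - l + 1).toNat := by
        rw [PySem.List.slice_toNat z h0 (by omega)]
        exact pvSeg_congr z l.toNat l.toNat ((r+1).toNat - l.toNat) (r - l + 1).toNat rfl (by omega)
      simp only [List.mem_append]
      constructor
      · rintro (hhd | htl)
        · have hm : m ≤ r - l + 1 ∧ p = (l, String.ofList (PySem.List.slice z (some l) (some (r + 1)))) := by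
            by_cases hmm : m ≤ r - l + 1
            · rw [if_pos hmm] at hhd
              simp at hhd
              exact ⟨hmm, hhd⟩
            · rw [if_neg hmm] at hhd
              simp at hhd
          refine ⟨0, by omega, by omega, by simpa using hm.1, by omega, ?_, ?_⟩
          · rw [pvSeg_congr z (l - (0:Nat)).toNat l.toNat (r - l + 1 + 2*(0:Nat)).toNat (r - l + 1).toNat
              (by omega) (by omega)]
            exact palcur
          · rw [hm.2, hslice]
            simp only [Prod.mk.injEq]
            exact ⟨by simp, congrArg _ (pvSeg_congr z l.toNat (l - (0:Nat)).toNat (r - l + 1).toNat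
                (r - l + 1 + 2*(0:Nat)).toNat (by omega) (by omega))⟩
        · obtain ⟨k', hk1, hk2, hk3, hk4, hk5, hk6⟩ := (htail palcur p).1 htl
          refine ⟨k' + 1, by push_cast; omega, by push_cast at hk2 ⊢; omega,
            by push_cast at hk3 ⊢; omega, by push_cast at hk4 ⊢; omega, ?_, ?_⟩
          · rwa [pvSeg_congr z (l - 1 - k').toNat (l - (k'+1:Nat)).toNat
              ((r + 1) - (l - 1) + 1 + 2*k').toNat (r - l + 1 + 2*(k'+1:Nat)).toNat
              (by push_cast; omega) (by push_cast; omega)] at hk5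
          · rw [hk6]
            simp only [Prod.mk.injEq]
            exact ⟨by push_cast; ring, congrArg _ (pvSeg_congr z (l - 1 - k').toNat (l - (k'+1:Nat)).toNat
                ((r + 1) - (l - 1) + 1 + 2*k').toNat (r - l + 1 + 2*(k'+1:Nat)).toNat
                (by push_cast; omega) (by push_cast; omega))⟩
      · rintro ⟨k, hk1, hk2, hk3, hk4, hk5, hk6⟩
        match k with
        | 0 =>
          left
          have : p = (l, String.ofList (PySem.List.slice z (some l) (some (r + 1)))) := by
            rw [hk6, hslice]
            simp only [Prod.mk.injEq]
            exact ⟨by simp, congrArg _ (pvSeg_congr z (l - (0:Nat)).toNat l.toNat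
                (r - l + 1 + 2*(0:Nat)).toNat (r - l + 1).toNat (by omega) (by omega))⟩
          rw [if_pos (by simpa using hk3)]
          simp [this]
        | (k' + 1) =>
          right
          refine (htail palcur p).2 ⟨k', by push_cast at hk1 ⊢; omega, by push_cast at hk2 ⊢; omega,
            by push_cast at hk3 ⊢; omega, by push_cast at hk4 ⊢; omega, ?_, ?_⟩
          · rwa [pvSeg_congr z (l - (k'+1:Nat)).toNat (l - 1 - k').toNat
              (r - l + 1 + 2*(k'+1:Nat)).toNat ((r + 1) - (l - 1) + 1 + 2*k').toNat
              (by push_cast; omega) (by push_cast; omega)] at hk5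
          · rw [hk6]
            simp only [Prod.mk.injEq]
            exact ⟨by push_cast; ring, congrArg _ (pvSeg_congr z (l - (k'+1:Nat)).toNat (l - 1 - k').toNat
                (r - l + 1 + 2*(k'+1:Nat)).toNat ((r + 1) - (l - 1) + 1 + 2*k').toNat
                (by push_cast; omega) (by push_cast; omega))⟩
  · rw [if_neg hc]
    simp only [List.not_mem_nil, false_iff]
    rintro ⟨k, hk1, hk2, hk3, hk4, hk5, hk6⟩
    exact hc ⟨h0, by omega,
      pal_ends_get z l r h0 hlr (by omega) (chain_to_cur z l r k h0 hk1 hlr hk2 hk5)⟩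

lemma E_mem (z : List Char) (m : Int) :
    ∀ (l r : Int), 0 ≤ l → l ≤ r →
      pvPal (pvSeg z (l+1).toNat (r - l - 1).toNat) →
      ∀ p, p ∈ pvE z m l r ↔ pvEStmt z m l r p := by
  suffices H : ∀ (n : Nat) (l r : Int), l.toNat = n → 0 ≤ l → l ≤ r →
      pvPal (pvSeg z (l+1).toNat (r - l - 1).toNat) →
      ∀ p, p ∈ pvE z m l r ↔ pvEStmt z m l r p by
    intro l r h0 hlr hin
    exact H l.toNat l r rfl h0 hlr hin
  intro n
  induction n with
  | zero =>
    intro l r hn h0 hlr hin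
    have hl : l = 0 := by omega
    subst hl
    apply E_mem_step z m 0 r h0 hlr hin
    intro _ p
    have hnil : pvE z m (0-1) (r+1) = [] := by
      rw [pvE_eq, if_neg]
      rintro ⟨hge, -, -⟩
      omega
    rw [hnil]
    simp only [List.not_mem_nil, false_iff]
    rintro ⟨k, hk1, -, -, -, -, -⟩
    omega
  | succ n ih =>
    intro l r hn h0 hlr hin
    apply E_mem_step z m l r h0 hlr hin
    intro hpal p
    apply ih (l-1) (r+1) (by omega) (by omega) (by omega)
    rw [pvSeg_congr z ((l-1)+1).toNat l.toNat ((r+1) - (l-1) - 1).toNat (r - l + 1).toNat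
      (by omega) (by omega)]
    exact hpal

def pvBlock (z : List Char) (m : Int) (c : Int) : List (Int × String) :=
  pvE z m c c ++ pvE z m c (c + 1)

def pvBRaw (z : List Char) (m : Int) : List (Int × String) :=
  (PySem.List.pyRange 0 (z.length : Int) 1).flatMap (pvBlock z m)

lemma B_raw_eq (text : String) (m : Int) :
    finde_palindrome_alt text m =
      PySem.List.sorted2 (pvBRaw (text.toList.filter PySem.Chars.isdigit) m)
        (fun t => t.1) (fun t => PySem.Str.len t.2) false := by
  unfold finde_palindrome_alt pvBRaw pvBlock
  set z := text.toList.filter PySem.Chars.isdigit with hz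
  show PySem.List.sorted2
      ((PySem.List.pyRange 0 (z.length : Int) 1).foldl
        (fun acc mitte => pvExpand z m mitte (mitte + 1) (pvExpand z m mitte mitte acc)) [])
      (fun t => t.1) (fun t => PySem.Str.len t.2) false = _
  congr 1
  refine Eq.trans (PySem.List.foldl_congr_mem _ _
    (fun (acc : List (Int × String)) c => acc ++ (pvE z m c c ++ pvE z m c (c + 1))) []
    (fun acc c _ => by rw [pvExpand_acc, pvExpand_acc]; simp)) ?_
  rw [PySem.List.foldl_append_eq_flatMap]
  simp

-- membership in a block, with the centre signature 2c + parity = 2 i + L - 1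
lemma pal_empty_inner (z : List Char) (c : Int) (d : Int) (hd : d - 1 ≤ 0) :
    pvPal (pvSeg z (c+1).toNat (d - 1).toNat) := by
  rw [pvSeg_congr z (c+1).toNat (c+1).toNat (d - 1).toNat 0 rfl (by omega)]
  rfl

lemma block_mem (z : List Char) (m : Int) (c : Int) (hc : 0 ≤ c) (p : Int × String) :
    p ∈ pvBlock z m c ↔
      ∃ i L : Nat, pvGood z m i L ∧ p = pvEntry z i L ∧
        (2*c = 2*(i : Int) + (L : Int) - 1 ∨ 2*c + 1 = 2*(i : Int) + (L : Int) - 1) := by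
  unfold pvBlock
  rw [List.mem_append,
    E_mem z m c c hc le_rfl (pal_empty_inner z c (c - c) (by omega)),
    E_mem z m c (c+1) hc (by omega) (pal_empty_inner z c (c + 1 - c) (by omega))]
  constructor
  · rintro (⟨k, hk1, hk2, hk3, hk4, hk5, hk6⟩ | ⟨k, hk1, hk2, hk3, hk4, hk5, hk6⟩)
    · refine ⟨(c - k).toNat, (c - c + 1 + 2*k).toNat, ⟨by omega, by push_cast; omega, by omega,
        by push_cast at hk2 ⊢; omega, hk5⟩, ?_, Or.inl (by push_cast; omega)⟩
      rw [hk6]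
      simp only [pvEntry, Prod.mk.injEq]
      exact ⟨by omega, by simp⟩
    · refine ⟨(c - k).toNat, (c + 1 - c + 1 + 2*k).toNat, ⟨by omega, by push_cast; omega, by omega,
        by push_cast at hk2 ⊢; omega, hk5⟩, ?_, Or.inr (by push_cast; omega)⟩
      rw [hk6]
      simp only [pvEntry, Prod.mk.injEq]
      exact ⟨by omega, by simp⟩
  · rintro ⟨i, L, ⟨hL1, hLm, hL14, hbnd, hpal⟩, rfl, hsig | hsig⟩
    · left
      have hik : (i : Int) ≤ c := by omega
      refine ⟨(c - i).toNat, by omega, by push_cast; omega, by push_cast; omega,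
        by push_cast; omega, ?_, ?_⟩
      · rwa [pvSeg_congr z (c - ((c - i).toNat : Int)).toNat i
          ((c - c + 1 + 2*((c - i).toNat : Int)).toNat) L (by push_cast; omega) (by push_cast; omega)]
      · simp only [pvEntry, Prod.mk.injEq]
        refine ⟨by push_cast; omega, congrArg _ (pvSeg_congr z i (c - ((c - i).toNat : Int)).toNat L
          ((c - c + 1 + 2*((c - i).toNat : Int)).toNat) (by push_cast; omega) (by push_cast; omega))⟩
    · right
      have hik : (i : Int) ≤ c := by omega
      refine ⟨(c - i).toNat, by omega, by push_cast; omega, by push_cast; omega,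
        by push_cast; omega, ?_, ?_⟩
      · rwa [pvSeg_congr z (c - ((c - i).toNat : Int)).toNat i
          ((c + 1 - c + 1 + 2*((c - i).toNat : Int)).toNat) L (by push_cast; omega) (by push_cast; omega)]
      · simp only [pvEntry, Prod.mk.injEq]
        refine ⟨by push_cast; omega, congrArg _ (pvSeg_congr z i (c - ((c - i).toNat : Int)).toNat L
          ((c + 1 - c + 1 + 2*((c - i).toNat : Int)).toNat) (by push_cast; omega) (by push_cast; omega))⟩

lemma B_mem (z : List Char) (m : Int) (p : Int × String) :
    p ∈ pvBRaw z m ↔ ∃ i L : Nat, pvGood z m i L ∧ p = pvEntry z i L := by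
  unfold pvBRaw
  rw [List.mem_flatMap]
  constructor
  · rintro ⟨c, hc, hp⟩
    rw [PySem.List.mem_pyRange_one] at hc
    obtain ⟨i, L, hgood, hpe, -⟩ := (block_mem z m c hc.1 p).1 hp
    exact ⟨i, L, hgood, hpe⟩
  · rintro ⟨i, L, hgood, rfl⟩
    obtain ⟨hL1, hLm, hL14, hbnd, hpal⟩ := hgood
    rcases Nat.even_or_odd L with ⟨t, ht⟩ | ⟨t, ht⟩
    · -- L = 2t even, t ≥ 1; centre c = i + t - 1, even-parity chain
      refine ⟨(i : Int) + t - 1, ?_, (block_mem z m ((i : Int) + t - 1) (by omega) _).2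
        ⟨i, L, ⟨hL1, hLm, hL14, hbnd, hpal⟩, rfl, Or.inr (by push_cast; omega)⟩⟩
      rw [PySem.List.mem_pyRange_one]
      constructor
      · omega
      · push_cast; omega
    · -- L = 2t+1 odd; centre c = i + t, odd-parity chain
      refine ⟨(i : Int) + t, ?_, (block_mem z m ((i : Int) + t) (by omega) _).2
        ⟨i, L, ⟨hL1, hLm, hL14, hbnd, hpal⟩, rfl, Or.inl (by push_cast; omega)⟩⟩
      rw [PySem.List.mem_pyRange_one]
      constructor
      · omega
      · push_cast; omega

-- entries of an expansion have strictly decreasing start indices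
lemma Ego_fst (z : List Char) (m : Int) :
    ∀ (fuel : Nat) (l r : Int),
      (pvExpandGo z m fuel l r []).Pairwise (fun p q => q.1 < p.1) ∧
      (∀ p ∈ pvExpandGo z m fuel l r [], p.1 ≤ l) := by
  intro fuel
  induction fuel with
  | zero => intro l r; simp [pvExpandGo]
  | succ fuel ih =>
    intro l r
    rw [pvExpandGo]
    by_cases h1 : 0 ≤ l ∧ r < (z.length : Int) ∧ PySem.List.pyGet? z l = PySem.List.pyGet? z r
    · rw [if_pos h1]
      by_cases h2 : r - l + 1 > 14
      · rw [if_pos h2]; simp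
      · rw [if_neg h2, pvExpandGo_acc]
        obtain ⟨ihp, ihb⟩ := ih (l - 1) (r + 1)
        constructor
        · rw [List.pairwise_append]
          refine ⟨?_, ihp, ?_⟩
          · split_ifs <;> simp
          · intro x hx y hy
            have hy' := ihb y hy
            split_ifs at hx with hmm
            · simp at hx
              rw [hx]
              omega
            · simp at hx
        · intro p hp
          rw [List.mem_append] at hp
          rcases hp with hp | hp
          · split_ifs at hp with hmm
            · simp at hp
              rw [hp]
            · simp at hp
          · have := ihb p hp
            omega
    · rw [if_neg h1]; simp

lemma E_nodup (z : List Char) (m : Int) (l r : Int) : (pvE z m l r).Nodup := by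
  have h := (Ego_fst z m (l+1).toNat l r).1
  exact h.imp (fun hlt => by intro he; rw [he] at hlt; exact lt_irrefl _ hlt)

-- an entry determines its (start, length) pair
lemma entry_data (z : List Char) (i L : Nat) (h : i + L ≤ z.length) :
    (pvEntry z i L).1 = (i : Int) ∧ (pvEntry z i L).2.toList.length = L := by
  constructor
  · rfl
  · simp only [pvEntry, String.toList_ofList]
    exact pvSeg_length z i L h

lemma B_nodup (z : List Char) (m : Int) : (pvBRaw z m).Nodup := by
  unfold pvBRaw
  rw [List.nodup_flatMap]
  constructor
  · intro c hc
    rw [PySem.List.mem_pyRange_one] at hc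
    unfold pvBlock
    rw [List.nodup_append]
    refine ⟨E_nodup z m c c, E_nodup z m c (c+1), ?_⟩
    intro p hp q hq
    intro he
    subst he
    obtain ⟨k, hk1, hk2, hk3, hk4, hk5, hk6⟩ :=
      (E_mem z m c c hc.1 le_rfl (pal_empty_inner z c (c - c) (by omega)) p).1 hp
    obtain ⟨k', hk1', hk2', hk3', hk4', hk5', hk6'⟩ :=
      (E_mem z m c (c+1) hc.1 (by omega : c ≤ c + 1) (pal_empty_inner z c (c + 1 - c) (by omega)) p).1 hq
    have e1 : p.2.toList.length = (c - c + 1 + 2*k).toNat := by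
      rw [hk6]
      simp only [String.toList_ofList]
      exact pvSeg_length z _ _ (by push_cast at hk2 ⊢; omega)
    have e2 : p.2.toList.length = (c + 1 - c + 1 + 2*k').toNat := by
      rw [hk6']
      simp only [String.toList_ofList]
      exact pvSeg_length z _ _ (by push_cast at hk2' ⊢; omega)
    omega
  · refine List.Pairwise.imp_of_mem ?_ (PySem.List.pairwise_lt_pyRange_one 0 (z.length : Int))
    intro c c' hcm hcm' hlt p hp hp'
    rw [PySem.List.mem_pyRange_one] at hcm hcm'
    obtain ⟨i, L, hgood, hpe, hsig⟩ := (block_mem z m c hcm.1 p).1 hp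
    obtain ⟨i', L', hgood', hpe', hsig'⟩ := (block_mem z m c' hcm'.1 p).1 hp'
    have hd := entry_data z i L hgood.2.2.2.1
    have hd' := entry_data z i' L' hgood'.2.2.2.1
    have hi : (i : Int) = (i' : Int) := by
      rw [hpe] at hpe'
      rw [← hd.1, ← hd'.1, hpe']
    have hL : L = L' := by
      have h1 := hd.2
      have h2 := hd'.2
      have he : pvEntry z i L = pvEntry z i' L' := by rw [← hpe, hpe']
      rw [← he] at h2
      omega
    rcases hsig with h | h <;> rcases hsig' with h' | h' <;> omega

-- ===== assembling =====
lemma sorted2_eq_sorted_lex (xs : List (Int × String)) :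
    PySem.List.sorted2 xs (fun t => t.1) (fun t => PySem.Str.len t.2) false =
      PySem.List.sorted xs pvKey false := by
  have hbe : (fun (a b : Int × String) =>
      decide (a.1 < b.1) || (!decide (b.1 < a.1) && decide (PySem.Str.len a.2 < PySem.Str.len b.2)))
      = (fun (a b : Int × String) => decide (pvKey a < pvKey b)) := by
    funext a b
    simp only [pvKey, Prod.Lex.toLex_lt_toLex]
    by_cases h : a.1 < b.1
    · simp [h]
    · by_cases h2 : b.1 < a.1
      · simp only [Bool.or_eq_false_iff, decide_eq_false_iff_not, Bool.and_eq_false_iff] at *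
        simp [h, h2]
        omega
      · have he : a.1 = b.1 := by omega
        simp [h, h2, he]
  unfold PySem.List.sorted2 PySem.List.sorted
  show List.foldl (fun acc x => PySem.List.insertBy (fun a b =>
      decide (a.1 < b.1) || (!decide (b.1 < a.1) && decide (PySem.Str.len a.2 < PySem.Str.len b.2))) x acc) [] xs
    = List.foldl (fun acc x => PySem.List.insertBy (fun a b => decide (pvKey a < pvKey b)) x acc) [] xs
  rw [hbe]

lemma main_eq (text : String) (m : Int) (hm : 1 ≤ m) :
    finde_palindrome text m = finde_palindrome_alt text m := by
  rw [A_eq, B_raw_eq, sorted2_eq_sorted_lex]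
  set z := text.toList.filter PySem.Chars.isdigit with hz
  have hAnodup : (pvAList z m).Nodup :=
    (A_pairwise z m hm).imp (fun hlt => by intro he; rw [he] at hlt; exact lt_irrefl _ hlt)
  have hperm : (pvAList z m).Perm (pvBRaw z m) :=
    (List.perm_ext_iff_of_nodup hAnodup (B_nodup z m)).2
      (fun p => (A_mem z m hm p).trans (B_mem z m p).symm)
  exact (PySem.List.sorted_eq_of_perm_of_pairwise_lt _ _ pvKey hperm (A_pairwise z m hm)).symm

lemma nodigits_eq (text : String) (m : Int)
    (h : (text.toList.any PySem.Chars.isdigit) = false) :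
    finde_palindrome text m = finde_palindrome_alt text m := by
  have hz : text.toList.filter PySem.Chars.isdigit = [] := by
    rw [List.filter_eq_nil_iff]
    exact List.any_eq_false.1 h
  rw [A_eq, B_raw_eq, hz]
  rfl

-- ===== VERDICT (by name: the statement is the Claim_ definition above) =====
theorem finde_palindrome_spec : Claim_unchanged_finde_palindrome := by
  intro text m _ h
  rcases lt_or_ge m 1 with hlt | hge
  · have : (text.toList.any PySem.Chars.isdigit) = false := by
      by_contra hne
      exact h ⟨by omega, by simpa using hne⟩
    exact nodigits_eq text m this
  · exact main_eq text m hge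

theorem finde_palindrome_changed : Claim_changed_finde_palindrome := by
  unfold Claim_changed_finde_palindrome; decide

theorem finde_palindrome_tight : Claim_exact_finde_palindrome := by
  intro text m _ hD
  obtain ⟨hm, hany⟩ := hD
  set z := text.toList.filter PySem.Chars.isdigit with hz
  have hzlen : 1 ≤ z.length := by
    rw [List.any_eq_true] at hany
    obtain ⟨c, hc, hdig⟩ := hany
    have hcz : c ∈ z := List.mem_filter.2 ⟨hc, hdig⟩
    have := List.ne_nil_of_mem hcz
    cases hzz : z with
    | nil => rw [hzz] at this; simp at this
    | cons a t => simp
  intro heq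
  have hmemA : ((0 : Int), "") ∈ finde_palindrome text m := by
    rw [A_eq, ← hz]
    unfold pvAList
    rw [List.mem_flatMap]
    refine ⟨0, ?_, ?_⟩
    · rw [PySem.List.mem_pyRange_one]
      constructor
      · omega
      · push_cast; omega
    · rw [List.mem_map]
      refine ⟨0, ?_, ?_⟩
      · rw [List.mem_filter]
        constructor
        · rw [PySem.List.mem_pyRange_one, lt_min_iff]
          refine ⟨by omega, by omega, by push_cast; omega⟩
        · unfold pvPredA
          rw [pvSlice_seg z 0 0 le_rfl le_rfl]
          rw [pvSeg_congr z (0:Int).toNat 0 ((0:Int) - 0).toNat 0 (by omega) (by omega)]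
          simp only [Bool.and_eq_true, beq_iff_eq, decide_eq_true_eq]
          exact ⟨rfl, by simp [pvSeg]; omega⟩
      · rw [pvSlice_seg z 0 0 le_rfl le_rfl]
        rw [pvSeg_congr z (0:Int).toNat 0 ((0:Int) - 0).toNat 0 (by omega) (by omega)]
        rfl
  rw [heq, B_raw_eq] at hmemA
  have hmemRaw : ((0 : Int), "") ∈ pvBRaw z m :=
    ((PySem.List.sorted2_perm _ _ _ false).mem_iff).1 hmemA
  obtain ⟨i, L, hgood, hpe⟩ := (B_mem z m _).1 hmemRaw
  have hlen := (entry_data z i L hgood.2.2.2.1).2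
  rw [← hpe] at hlen
  simp at hlen
  have := hgood.1
  omega
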